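-- pv_equiv track=rewrite | github.com/shahpriyesh/PracticeCode | HashMapQuestions/CheckIfNAndItsDoubleExist.py | check
-- ===== SOURCE A (Python) =====
-- def check(arr):
--     hmap = {}
--     cnt = 0
--
--     for num in arr:
--         if num:
--             hmap[num] = 2*num
--         else:
--             # special handling for 0
--             cnt += 1
--             hmap[num] = cnt
--
--     for num in arr:
--         if num:
--             if 2*num in hmap:
--                 return True
--         else:
--             # special handling for 0
--             if hmap[num] > 1:
--                 return True
--
--     return False
-- ===== SOURCE B (Python) =====
-- def check(arr):
--     # Single pass with two sets and early exit (A builds a full dict first, then rescans).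
--     seen = set()
--     doubles = set()
--     for x in arr:
--         if x in doubles or 2 * x in seen:
--             return True
--         seen.add(x)
--         doubles.add(2 * x)
--     return False
-- ===== Notes on version B (the rewrite author's own statement) =====
-- stated objective: idiomatic
-- what changed: Replaced A's two passes (build a dict of every element, then rescan the whole array consulting it, with a separate zero-counter) by one short-circuiting pass that maintains a 'seen' set and a 'doubles' set; the two-zeros case falls out of 0 being its own double, with no special-casing.
import Mathlib
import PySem

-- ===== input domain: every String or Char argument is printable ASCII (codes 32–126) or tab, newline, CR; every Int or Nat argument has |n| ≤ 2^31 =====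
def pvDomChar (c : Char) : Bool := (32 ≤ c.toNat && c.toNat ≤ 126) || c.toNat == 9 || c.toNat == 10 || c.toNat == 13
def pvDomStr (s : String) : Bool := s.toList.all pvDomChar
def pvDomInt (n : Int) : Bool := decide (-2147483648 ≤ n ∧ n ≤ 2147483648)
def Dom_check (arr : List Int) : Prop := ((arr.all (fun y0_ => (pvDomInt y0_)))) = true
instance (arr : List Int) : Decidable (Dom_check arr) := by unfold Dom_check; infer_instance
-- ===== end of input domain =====

-- B replaces A's two passes (dict of all elements + rescan, with a zero counter) by one
-- short-circuiting pass over two sets; same return value on every list of ints.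

-- ===== PORT A =====
-- first loop: builds (hmap, cnt)
def checkFill (arr : List Int) : PySem.Dict Int Int × Int :=
  arr.foldl
    (fun st num =>
      if num ≠ 0 then (st.1.insert num (2 * num), st.2)
      else (st.1.insert num (st.2 + 1), st.2 + 1))
    (PySem.Dict.empty, 0)

-- second loop with early return; `hmap[num]` is ported as getD 0: the first loop
-- inserted every element of arr, so the key is always present (no KeyError).
def checkScan (hmap : PySem.Dict Int Int) : List Int → Bool
  | [] => false
  | num :: rest =>
    if num ≠ 0 then
      if hmap.contains (2 * num) then true else checkScan hmap rest
    else
      if hmap.getD num 0 > 1 then true else checkScan hmap rest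

def check (arr : List Int) : Bool :=
  checkScan (checkFill arr).1 arr

-- ===== PORT B =====
def checkAltLoop (seen doubles : PySem.Set Int) : List Int → Bool
  | [] => false
  | x :: rest =>
    if doubles.contains x || seen.contains (2 * x) then true
    else checkAltLoop (seen.add x) (doubles.add (2 * x)) rest

def check_alt (arr : List Int) : Bool :=
  checkAltLoop PySem.Set.empty PySem.Set.empty arr

-- ===== PRECONDITION & SPEC =====
def Spec_check (arr : List Int) (out : Bool) : Prop := out = check_alt arr
instance (arr : List Int) (out : Bool) : Decidable (Spec_check arr out) := by unfold Spec_check; infer_instance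

-- ===== CLAIM (what is proved, stated in full; the proofs are below) =====
def Claim_equal_check : Prop := ∀ (arr : List Int), Dom_check arr → Spec_check arr (check arr)

-- ===== LEMMAS AND PROOFS =====

-- A's first loop: key membership = membership in the list
theorem checkFill_contains (l : List Int) (d : PySem.Dict Int Int) (c : Int) (x : Int) :
    ((l.foldl (fun st num =>
      if num ≠ 0 then (st.1.insert num (2 * num), st.2)
      else (st.1.insert num (st.2 + 1), st.2 + 1)) (d, c)).1.contains x) =
    (d.contains x || decide (x ∈ l)) := by
  induction l generalizing d c with
  | nil => simp
  | cons h t ih =>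
    rw [List.foldl_cons]
    by_cases hz : h = 0
    · rw [if_neg (by simp [hz]), ih]
      subst hz
      simp [PySem.Dict.contains_insert, List.mem_cons]
      by_cases hx : x = 0
      · simp [hx]
      · have hb : (x == (0:Int)) = false := beq_eq_false_iff_ne.mpr hx
        simp [hb, hx]
    · rw [if_pos hz, ih]
      simp [PySem.Dict.contains_insert, List.mem_cons]
      by_cases hx : x = h
      · simp [hx]
      · have hb : (x == h) = false := beq_eq_false_iff_ne.mpr hx
        simp [hb, hx]

-- A's first loop: value stored at key 0
theorem checkFill_zeroVal (l : List Int) (d : PySem.Dict Int Int) (c : Int) :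
    ((l.foldl (fun st num =>
      if num ≠ 0 then (st.1.insert num (2 * num), st.2)
      else (st.1.insert num (st.2 + 1), st.2 + 1)) (d, c)).1.getD 0 0) =
    (if 0 ∈ l then c + l.count 0 else d.getD 0 0) := by
  induction l generalizing d c with
  | nil => simp
  | cons h t ih =>
    rw [List.foldl_cons]
    by_cases hz : h = 0
    · rw [if_neg (by simp [hz]), ih]
      subst hz
      by_cases h0 : (0 : Int) ∈ t
      · simp [h0, List.count_cons]; ring
      · simp [h0, PySem.Dict.getD_insert, List.count_cons, List.count_eq_zero.mpr h0]
    · rw [if_pos hz, ih]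
      by_cases h0 : (0 : Int) ∈ t
      · simp [h0, hz, List.mem_cons, List.count_cons, Ne.symm hz]
      · have : ¬ (0 : Int) ∈ h :: t := by simp [h0, Ne.symm hz]
        simp [h0, this, PySem.Dict.getD_insert, Ne.symm hz]

-- A's second loop is an existence test
theorem checkScan_iff (hmap : PySem.Dict Int Int) (l : List Int) :
    checkScan hmap l = true ↔
      ∃ x ∈ l, (x ≠ 0 ∧ hmap.contains (2 * x) = true) ∨ (x = 0 ∧ hmap.getD 0 0 > 1) := by
  induction l with
  | nil => simp [checkScan]
  | cons h t ih =>
    by_cases hz : h ≠ 0 <;> simp only [checkScan, hz] <;> split_ifs with hc <;>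
      simp_all <;> tauto

-- characterisation of A
theorem check_iff (arr : List Int) :
    check arr = true ↔
      (∃ x ∈ arr, x ≠ 0 ∧ (2 * x) ∈ arr) ∨ (0 ∈ arr ∧ 1 < arr.count 0) := by
  unfold check checkFill
  rw [checkScan_iff]
  constructor
  · rintro ⟨x, hx, hcase⟩
    rcases hcase with ⟨hne, hc⟩ | ⟨hx0, hv⟩
    · left
      refine ⟨x, hx, hne, ?_⟩
      rw [checkFill_contains] at hc
      simpa using hc
    · right
      subst hx0
      rw [checkFill_zeroVal] at hv
      simp [hx] at hv
      exact ⟨hx, by omega⟩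
  · rintro (⟨x, hx, hne, hm⟩ | ⟨h0, hcnt⟩)
    · refine ⟨x, hx, Or.inl ⟨hne, ?_⟩⟩
      rw [checkFill_contains]
      simp [hm]
    · refine ⟨0, h0, Or.inr ⟨rfl, ?_⟩⟩
      rw [checkFill_zeroVal]
      simp [h0]
      omega

-- B's loop is a split test
theorem checkAltLoop_iff (seen doubles : PySem.Set Int) (l : List Int) :
    checkAltLoop seen doubles l = true ↔
      ∃ p x s, l = p ++ x :: s ∧
        (x ∈ doubles ∨ (∃ y ∈ p, x = 2 * y) ∨ (2 * x) ∈ seen ∨ (2 * x) ∈ p) := by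
  induction l generalizing seen doubles with
  | nil => simp [checkAltLoop]
  | cons h t ih =>
    simp only [checkAltLoop]
    split_ifs with hc
    · simp only [true_iff, eq_self_iff_true]
      refine ⟨[], h, t, rfl, ?_⟩
      rcases Bool.or_eq_true_iff.mp hc with hd | hs
      · exact Or.inl (by simpa [PySem.Set.contains] using hd)
      · exact Or.inr (Or.inr (Or.inl (by simpa [PySem.Set.contains] using hs)))
    · rw [ih]
      constructor
      · rintro ⟨p, x, s, rfl, hcase⟩
        refine ⟨h :: p, x, s, rfl, ?_⟩
        rcases hcase with hd | hy | hs | hp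
        · rcases (PySem.Set.mem_add _ _ _).mp hd with hd | hd
          · exact Or.inl hd
          · exact Or.inr (Or.inl ⟨h, by simp, hd⟩)
        · obtain ⟨y, hyp, hxy⟩ := hy
          exact Or.inr (Or.inl ⟨y, by simp [hyp], hxy⟩)
        · rcases (PySem.Set.mem_add _ _ _).mp hs with hs | hs
          · exact Or.inr (Or.inr (Or.inl hs))
          · exact Or.inr (Or.inr (Or.inr (by simp [hs])))
        · exact Or.inr (Or.inr (Or.inr (by simp [hp])))
      · rintro ⟨p, x, s, hsplit, hcase⟩
        cases p with
        | nil =>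
          simp at hsplit
          obtain ⟨rfl, rfl⟩ := hsplit
          exfalso
          rcases hcase with hd | hy | hs | hp
          · exact absurd (by simpa [PySem.Set.contains] using hd)
              (by simp at hc; exact hc.1)
          · simp at hy
          · exact absurd (by simpa [PySem.Set.contains] using hs)
              (by simp at hc; exact hc.2)
          · simp at hp
        | cons h' p' =>
          simp only [List.cons_append, List.cons.injEq] at hsplit
          obtain ⟨rfl, rfl⟩ := hsplit
          refine ⟨p', x, s, rfl, ?_⟩
          rcases hcase with hd | hy | hs | hp
          · exact Or.inl ((PySem.Set.mem_add _ _ _).mpr (Or.inl hd))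
          · obtain ⟨y, hyp, hxy⟩ := hy
            rcases List.mem_cons.mp hyp with rfl | hyp'
            · exact Or.inl ((PySem.Set.mem_add _ _ _).mpr (Or.inr hxy))
            · exact Or.inr (Or.inl ⟨y, hyp', hxy⟩)
          · exact Or.inr (Or.inr (Or.inl ((PySem.Set.mem_add _ _ _).mpr (Or.inl hs))))
          · rcases List.mem_cons.mp hp with hph | hpt
            · exact Or.inr (Or.inr (Or.inl ((PySem.Set.mem_add _ _ _).mpr (Or.inr hph))))
            · exact Or.inr (Or.inr (Or.inr hpt))

-- split of a list at a later occurrence of one of two distinct values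
theorem split_two_distinct {a b : Int} {l : List Int} (ha : a ∈ l) (hb : b ∈ l) (hab : a ≠ b) :
    ∃ p c s, l = p ++ c :: s ∧ ((c = a ∧ b ∈ p) ∨ (c = b ∧ a ∈ p)) := by
  induction l with
  | nil => simp at ha
  | cons h t ih =>
    by_cases hha : h = a
    · subst hha
      have hbt : b ∈ t := (List.mem_cons.mp hb).resolve_left (fun e => hab e.symm)
      obtain ⟨p', s', rfl⟩ := List.append_of_mem hbt
      exact ⟨h :: p', b, s', by simp, Or.inr ⟨rfl, by simp⟩⟩
    · by_cases hhb : h = b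
      · subst hhb
        have hat : a ∈ t := (List.mem_cons.mp ha).resolve_left (fun e => hab e)
        obtain ⟨p', s', rfl⟩ := List.append_of_mem hat
        exact ⟨h :: p', a, s', by simp, Or.inl ⟨rfl, by simp⟩⟩
      · have hat : a ∈ t := (List.mem_cons.mp ha).resolve_left (fun e => hha e.symm)
        have hbt : b ∈ t := (List.mem_cons.mp hb).resolve_left (fun e => hhb e.symm)
        obtain ⟨p, c, s, rfl, hcs⟩ := ih hat hbt
        refine ⟨h :: p, c, s, by simp, ?_⟩
        rcases hcs with ⟨rfl, hbp⟩ | ⟨rfl, hap⟩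
        · exact Or.inl ⟨rfl, by simp [hbp]⟩
        · exact Or.inr ⟨rfl, by simp [hap]⟩

-- split at the second occurrence of a value
theorem split_second_occ {a : Int} {l : List Int} (h : 2 ≤ l.count a) :
    ∃ p s, l = p ++ a :: s ∧ a ∈ p := by
  induction l with
  | nil => simp at h
  | cons x t ih =>
    by_cases hxa : x = a
    · subst hxa
      rw [List.count_cons_self] at h
      have hmt : x ∈ t := List.count_pos_iff.mp (by omega)
      obtain ⟨p', s', rfl⟩ := List.append_of_mem hmt
      exact ⟨x :: p', s', by simp, by simp⟩
    · have h2 : 2 ≤ t.count a := by simp only [List.count_cons, beq_iff_eq, if_neg hxa] at h; omega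
      obtain ⟨p, s, rfl, hap⟩ := ih h2
      exact ⟨x :: p, s, by simp, by simp [hap]⟩

-- the two characterisations agree
theorem chars_agree (arr : List Int) :
    ((∃ x ∈ arr, x ≠ 0 ∧ (2 * x) ∈ arr) ∨ (0 ∈ arr ∧ 1 < arr.count 0)) ↔
      (∃ p x s, arr = p ++ x :: s ∧ ((∃ y ∈ p, x = 2 * y) ∨ (2 * x) ∈ p)) := by
  constructor
  · rintro (⟨x, hx, hne, h2x⟩ | ⟨h0, hcnt⟩)
    · have hxd : x ≠ 2 * x := by omega
      obtain ⟨p, c, s, rfl, hcs⟩ := split_two_distinct hx h2x hxd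
      rcases hcs with ⟨hc, hdp⟩ | ⟨hc, hxp⟩
      · exact ⟨p, c, s, rfl, Or.inr (by rw [hc]; exact hdp)⟩
      · exact ⟨p, c, s, rfl, Or.inl ⟨x, hxp, hc⟩⟩
    · obtain ⟨p, s, rfl, h0p⟩ := split_second_occ hcnt
      exact ⟨p, 0, s, rfl, Or.inl ⟨0, h0p, by ring⟩⟩
  · rintro ⟨p, x, s, rfl, hcase⟩
    rcases hcase with ⟨y, hyp, rfl⟩ | h2xp
    · by_cases hy0 : y = 0
      · subst hy0
        right
        have h0m : (0 : Int) ∈ p ++ (2 * 0) :: s := by simp [hyp]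
        refine ⟨h0m, ?_⟩
        have hcp : 1 ≤ p.count 0 := List.count_pos_iff.mpr hyp
        simp [List.count_append, List.count_cons]
        omega
      · left
        exact ⟨y, by simp [hyp], hy0, by simp⟩
    · by_cases hx0 : x = 0
      · subst hx0
        right
        have h2 : (2 : Int) * 0 = 0 := by ring
        rw [h2] at h2xp
        refine ⟨by simp, ?_⟩
        have hcp : 1 ≤ p.count 0 := List.count_pos_iff.mpr h2xp
        simp [List.count_append, List.count_cons]
        omega
      · left
        exact ⟨x, by simp, hx0, by simp [h2xp]⟩

-- ===== VERDICT (by name: the statement is the Claim_ definition above) =====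
theorem check_spec : Claim_equal_check := by
  intro arr _
  unfold Spec_check
  rw [Bool.eq_iff_iff, check_iff]
  unfold check_alt
  rw [checkAltLoop_iff]
  simpa [PySem.Set.empty] using chars_agree arr
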